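-- pv_equiv track=rewrite | github.com/idrikreka01/ai-website-audit | worker/stage_summary_generator.py | _select_main_theme
-- ===== SOURCE A (Python) =====
-- STAGE_FOCUS_ORDER = {
--     "Awareness": ["clarity", "trust", "navigation", "performance"],
--     "Consideration": ["product info", "proof", "objections", "trust"],
--     "Conversion": ["friction", "payment trust", "error handling", "performance"],
-- }
--
-- def _select_main_theme(stage: str, category_sums: dict[str, int]) -> str:
--     if not category_sums:
--         return "general"
--     max_sum = max(category_sums.values())
--     candidates = [cat for cat, s in category_sums.items() if s == max_sum]
--     if len(candidates) == 1:
--         return candidates[0]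
--     focus_order = STAGE_FOCUS_ORDER.get(stage, [])
--     for cat in focus_order:
--         if cat in candidates:
--             return cat
--     return candidates[0]
-- ===== SOURCE B (Python) =====
-- STAGE_FOCUS_ORDER = {
--     "Awareness": ["clarity", "trust", "navigation", "performance"],
--     "Consideration": ["product info", "proof", "objections", "trust"],
--     "Conversion": ["friction", "payment trust", "error handling", "performance"],
-- }
--
--
-- def _select_main_theme(stage: str, category_sums: dict[str, int]) -> str:
--     if not category_sums:
--         return "general"
--     focus_order = STAGE_FOCUS_ORDER.get(stage, [])
--     rank = {cat: i for i, cat in enumerate(focus_order)}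
--     n = len(focus_order)
--     return max(category_sums, key=lambda c: (category_sums[c], -rank.get(c, n)))
-- ===== Notes on version B (the rewrite author's own statement) =====
-- stated objective: alternative
-- what changed: Replaces A's three passes (max of the values, collect tied candidates, scan the stage focus order) with a single max over the dict keys using the composite key (sum, -rank), where rank is a dict built once from the stage's focus order.
import Mathlib
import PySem

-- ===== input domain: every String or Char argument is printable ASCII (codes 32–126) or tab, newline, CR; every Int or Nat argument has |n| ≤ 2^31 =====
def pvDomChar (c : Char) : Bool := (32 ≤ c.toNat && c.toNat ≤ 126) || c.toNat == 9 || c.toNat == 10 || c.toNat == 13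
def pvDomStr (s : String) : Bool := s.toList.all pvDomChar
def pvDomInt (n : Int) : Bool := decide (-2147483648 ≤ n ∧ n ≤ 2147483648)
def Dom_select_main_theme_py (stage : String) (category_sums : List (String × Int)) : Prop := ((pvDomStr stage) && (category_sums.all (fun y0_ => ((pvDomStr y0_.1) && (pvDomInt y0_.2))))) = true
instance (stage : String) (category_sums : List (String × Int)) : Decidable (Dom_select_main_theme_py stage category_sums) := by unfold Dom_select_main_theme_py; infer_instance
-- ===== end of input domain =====

-- B replaces A's three passes (max value, collect tied candidates, scan the stage focus order)
-- by one max over the keys with the composite key (sum, -rank): objective 'alternative'.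

-- ===== PORT A =====
def stageFocusOrder : PySem.Dict String (List String) :=
  PySem.Dict.mk [("Awareness", ["clarity", "trust", "navigation", "performance"]),
                 ("Consideration", ["product info", "proof", "objections", "trust"]),
                 ("Conversion", ["friction", "payment trust", "error handling", "performance"])]

def select_main_theme_py (stage : String) (category_sums : List (String × Int)) : String :=
  if category_sums = [] then "general"
  else
    match PySem.List.max? (PySem.Dict.mk category_sums).values (fun v => v) with
    | none => "general"   -- unreachable: the dict is nonempty, Python's max cannot raise here
    | some max_sum =>
      let candidates := category_sums.foldl (fun acc p => if p.2 == max_sum then acc ++ [p.1] else acc) []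
      if candidates.length = 1 then candidates.headD ""
      else
        match (stageFocusOrder.getD stage []).find? (fun cat => candidates.contains cat) with
        | some cat => cat
        | none => candidates.headD ""   -- candidates[0]; candidates is provably nonempty

-- ===== PORT B =====
-- rank = {cat: i for i, cat in enumerate(focus_order)}
def rankDict (focus : List String) : PySem.Dict String Int :=
  (PySem.List.enumerate focus).foldl (fun d p => d.insert p.2 p.1) PySem.Dict.empty

def select_main_theme_py_alt (stage : String) (category_sums : List (String × Int)) : String :=
  if category_sums = [] then "general"
  else
    let focus_order := stageFocusOrder.getD stage []
    let rank := rankDict focus_order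
    let n : Int := focus_order.length
    let d := PySem.Dict.mk category_sums
    match PySem.List.max2? (category_sums.map Prod.fst)
        (fun c => d.getD c 0)            -- category_sums[c]: c is a key of the dict, the lookup cannot fail
        (fun c => -(rank.getD c n)) with
    | some c => c
    | none => "general"   -- unreachable: the key list is nonempty, Python's max cannot raise here

-- ===== PRECONDITION & SPEC =====
-- Pre_ excludes association lists with duplicate keys: such a list does not represent a
-- Python dict (the Python argument is a dict, whose keys are always distinct).
def Pre_select_main_theme_py (stage : String) (category_sums : List (String × Int)) : Prop :=
  (category_sums.map Prod.fst).Nodup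
instance (stage : String) (category_sums : List (String × Int)) : Decidable (Pre_select_main_theme_py stage category_sums) := by unfold Pre_select_main_theme_py; infer_instance

def pvWitness_select_main_theme_py : String × (List (String × Int)) :=
  ("Awareness", [("trust", 3), ("clarity", 3)])

def Spec_select_main_theme_py (stage : String) (category_sums : List (String × Int)) (out : String) : Prop := out = select_main_theme_py_alt stage category_sums
instance (stage : String) (category_sums : List (String × Int)) (out : String) : Decidable (Spec_select_main_theme_py stage category_sums out) := by unfold Spec_select_main_theme_py; infer_instance

-- ===== CLAIM (what is proved, stated in full; the proofs are below) =====
def Claim_equal_select_main_theme_py : Prop := ∀ (stage : String) (category_sums : List (String × Int)), Dom_select_main_theme_py stage category_sums → Pre_select_main_theme_py stage category_sums → Spec_select_main_theme_py stage category_sums (select_main_theme_py stage category_sums)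

-- ===== LEMMAS AND PROOFS =====

-- the step of Python's max with a 2-component key: first-wins, replace only on a strictly larger key
def ltKey (k1 k2 : String → Int) (a b : String) : Bool :=
  decide (k1 a < k1 b) || (!decide (k1 b < k1 a) && decide (k2 a < k2 b))

def maxStep (k1 k2 : String → Int) (acc : Option String) (x : String) : Option String :=
  match acc with
  | none => some x
  | some m => if ltKey k1 k2 m x then some x else some m

theorem max2_eq_foldl (xs : List String) (k1 k2 : String → Int) :
    PySem.List.max2? xs k1 k2 = xs.foldl (maxStep k1 k2) none := by
  simp only [PySem.List.max2?]
  congr 1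
  funext acc x
  cases acc <;> simp [maxStep, ltKey]

theorem ltKey_iff (k1 k2 : String → Int) (a b : String) :
    ltKey k1 k2 a b = true ↔ (k1 a < k1 b ∨ (k1 a ≤ k1 b ∧ k2 a < k2 b)) := by
  simp [ltKey]

theorem foldl_keep (k1 k2 : String → Int) (ys : List String) (a : String)
    (h : ∀ y ∈ ys, ltKey k1 k2 a y = false) :
    ys.foldl (maxStep k1 k2) (some a) = some a := by
  induction ys with
  | nil => rfl
  | cons y t ih =>
      simp only [List.foldl_cons, maxStep, h y (by simp)]
      exact ih (fun z hz => h z (by simp [hz]))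

theorem foldl_reach (k1 k2 : String → Int) (l : List String) (a m : String) (r : List String)
    (ha : ltKey k1 k2 a m = true) (hl : ∀ y ∈ l, ltKey k1 k2 y m = true)
    (hr : ∀ y ∈ r, ltKey k1 k2 m y = false) :
    (l ++ m :: r).foldl (maxStep k1 k2) (some a) = some m := by
  induction l generalizing a with
  | nil => simp only [List.nil_append, List.foldl_cons, maxStep, ha, if_pos]; exact foldl_keep _ _ _ _ hr
  | cons x t ih =>
      simp only [List.cons_append, List.foldl_cons]
      by_cases hx : ltKey k1 k2 a x = true
      · simp only [maxStep, hx, if_pos]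
        exact ih x (hl x (by simp)) (fun z hz => hl z (by simp [hz]))
      · simp only [maxStep, if_neg hx]
        exact ih a ha (fun z hz => hl z (by simp [hz]))

theorem foldl_main (k1 k2 : String → Int) (l : List String) (m : String) (r : List String)
    (hl : ∀ y ∈ l, ltKey k1 k2 y m = true) (hr : ∀ y ∈ r, ltKey k1 k2 m y = false) :
    (l ++ m :: r).foldl (maxStep k1 k2) none = some m := by
  cases l with
  | nil => simp only [List.nil_append, List.foldl_cons, maxStep]; exact foldl_keep _ _ _ _ hr
  | cons x t =>
      simp only [List.cons_append, List.foldl_cons, maxStep]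
      exact foldl_reach _ _ _ _ _ _ (hl x (by simp)) (fun z hz => hl z (by simp [hz])) hr

-- the fold computes the FIRST key attaining the lexicographically maximal (k1, k2) key,
-- provided that element is unique among the maximal ones
theorem foldl_eq_unique (k1 k2 : String → Int) (keys : List String) (hnd : keys.Nodup)
    (cands : List String) (M : Int)
    (hk1 : ∀ y ∈ keys, k1 y ≤ M ∧ (k1 y = M → y ∈ cands))
    (hk1c : ∀ y ∈ cands, y ∈ keys → k1 y = M)
    (m : String) (hm : m ∈ cands) (hmk : m ∈ keys)
    (hrank : ∀ y ∈ cands, y ∈ keys → k2 y ≤ k2 m ∧ (k2 y = k2 m → y = m)) :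
    keys.foldl (maxStep k1 k2) none = some m := by
  obtain ⟨l, r, hsp⟩ := List.append_of_mem hmk
  have hmnl : m ∉ l := by
    rw [hsp] at hnd
    exact fun h => (List.disjoint_of_nodup_append hnd) h (by simp)
  have hk1m : k1 m = M := hk1c m hm hmk
  rw [hsp]
  apply foldl_main
  · intro y hy
    have hyk : y ∈ keys := by rw [hsp]; simp [hy]
    have hyne : y ≠ m := fun h => hmnl (h ▸ hy)
    rw [ltKey_iff]
    rcases lt_or_eq_of_le (hk1 y hyk).1 with hlt | heq
    · left; omega
    · have hyc : y ∈ cands := (hk1 y hyk).2 heq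
      have h2 := hrank y hyc hyk
      right
      refine ⟨by omega, lt_of_le_of_ne h2.1 (fun h => hyne (h2.2 h))⟩
  · intro y hy
    have hyk : y ∈ keys := by rw [hsp]; simp [hy]
    rw [← Bool.not_eq_true, ltKey_iff]
    push Not
    rcases lt_or_eq_of_le (hk1 y hyk).1 with hlt | heq
    · exact ⟨by omega, fun _ => by omega⟩
    · have hyc : y ∈ cands := (hk1 y hyk).2 heq
      exact ⟨by omega, fun _ => (hrank y hyc hyk).1⟩

-- rank-dict lemmas
theorem rankDict_items (focus : List String) (h : focus.Nodup) :
    (rankDict focus).items = (PySem.List.enumerate focus).map (fun p => (p.2, p.1)) := by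
  unfold rankDict
  have h1 : ∀ a ∈ PySem.List.enumerate focus, (PySem.Dict.empty : PySem.Dict String Int).contains a.2 = false :=
    fun a _ => PySem.Dict.contains_empty _
  have h2 : ((PySem.List.enumerate focus).map (fun p => p.2)).Nodup := by
    rw [PySem.List.map_snd_enumerate]; exact h
  simpa using PySem.Dict.items_foldl_insert_fresh (PySem.List.enumerate focus)
    (fun p => p.2) (fun p => p.1) PySem.Dict.empty h1 h2

theorem rankDict_keys (focus : List String) (h : focus.Nodup) :
    (rankDict focus).keys = focus := by
  show (rankDict focus).items.map (·.1) = focus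
  rw [rankDict_items focus h, List.map_map]
  exact PySem.List.map_snd_enumerate focus 0

theorem rankDict_getD_mem (focus : List String) (h : focus.Nodup) (c : String) (hc : c ∈ focus) :
    (rankDict focus).getD c (focus.length : Int) = (List.idxOf c focus : Int) := by
  apply PySem.Dict.getD_of_mem_items
  · rw [rankDict_items focus h]
    have : ((List.idxOf c focus : Int), c) ∈ PySem.List.enumerate focus := by
      rw [PySem.List.mem_enumerate_iff]
      exact ⟨List.idxOf c focus, List.idxOf_lt_length_of_mem hc, by simp⟩
    exact List.mem_map.mpr ⟨_, this, rfl⟩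
  · rw [rankDict_keys focus h]; exact h

theorem rankDict_getD_not_mem (focus : List String) (h : focus.Nodup) (c : String) (hc : c ∉ focus) :
    (rankDict focus).getD c (focus.length : Int) = (focus.length : Int) := by
  apply PySem.Dict.getD_of_not_contains
  rw [PySem.Dict.contains_eq_decide_mem_keys, rankDict_keys focus h]
  simpa using hc

theorem focus_nodup (stage : String) : (stageFocusOrder.getD stage []).Nodup := by
  unfold stageFocusOrder
  simp only [PySem.Dict.getD_eq_get?_getD, PySem.Dict.get?_mk_cons]
  split_ifs <;> simp [PySem.Dict.get?]

-- A's focus-order scan returning m means: m is a candidate of minimal rank, and the unique one of its rank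
theorem find?_rank (focus : List String) (hfnd : focus.Nodup) (cands : List String) (m : String)
    (hfind : focus.find? (fun cat => cands.contains cat) = some m) :
    m ∈ cands ∧ ∀ y ∈ cands,
      ((rankDict focus).getD m (focus.length : Int) ≤ (rankDict focus).getD y (focus.length : Int)
       ∧ ((rankDict focus).getD y (focus.length : Int) = (rankDict focus).getD m (focus.length : Int) → y = m)) := by
  obtain ⟨hpm, fl, fr, hsp, hfl⟩ := List.find?_eq_some_iff_append.mp hfind
  have hm_mem : m ∈ cands := by simpa using hpm
  have hmf : m ∈ focus := by rw [hsp]; simp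
  have hmnfl : m ∉ fl := by intro h; exact (show m ∉ cands by simpa using hfl m h) hm_mem
  have hrm : (rankDict focus).getD m (focus.length : Int) = (List.idxOf m focus : Int) :=
    rankDict_getD_mem _ hfnd _ hmf
  have hidxm : List.idxOf m focus = fl.length := by
    rw [hsp, List.idxOf_append, if_neg hmnfl]; simp [List.idxOf_cons_self]
  have hfln : fl.length < focus.length := by
    rw [hsp]; simp
  refine ⟨hm_mem, fun y hy => ?_⟩
  by_cases hyf : y ∈ focus
  · have hynfl : y ∉ fl := by intro h; exact (show y ∉ cands by simpa using hfl y h) hy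
    have hry : (rankDict focus).getD y (focus.length : Int) = (List.idxOf y focus : Int) :=
      rankDict_getD_mem _ hfnd _ hyf
    have hidxy : List.idxOf y focus = List.idxOf y (m :: fr) + fl.length := by
      rw [hsp, List.idxOf_append, if_neg hynfl]
    refine ⟨by rw [hrm, hry, hidxm, hidxy]; omega, fun heq => ?_⟩
    rw [hrm, hry, hidxm, hidxy] at heq
    have h0 : List.idxOf y (m :: fr) = 0 := by omega
    have hymem : y ∈ m :: fr := by
      have hyy := hyf
      rw [hsp] at hyy
      rcases List.mem_append.mp hyy with h | h
      · exact absurd h hynfl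
      · exact h
    have hg := List.getElem_idxOf (List.idxOf_lt_length_of_mem hymem)
    simp only [h0] at hg
    simpa using hg.symm
  · have hry : (rankDict focus).getD y (focus.length : Int) = (focus.length : Int) :=
      rankDict_getD_not_mem _ hfnd _ hyf
    refine ⟨by rw [hrm, hry, hidxm]; omega, fun heq => ?_⟩
    rw [hrm, hry, hidxm] at heq
    omega

-- ===== VERDICT (by name: the statement is the Claim_ definition above) =====
theorem select_main_theme_py_spec : Claim_equal_select_main_theme_py := by
  intro stage cs _ hpre
  unfold Spec_select_main_theme_py
  by_cases hnil : cs = []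
  · simp [select_main_theme_py, select_main_theme_py_alt, hnil]
  have hknd : (cs.map Prod.fst).Nodup := hpre
  obtain ⟨M, hM⟩ : ∃ M, PySem.List.max? (PySem.Dict.mk cs).values (fun v => v) = some M := by
    cases h : PySem.List.max? (PySem.Dict.mk cs).values (fun v => v) with
    | none =>
        exfalso
        have h0 := (PySem.List.max?_eq_none_iff _ _).mp h
        have hv : (PySem.Dict.mk cs).values = cs.map Prod.snd := rfl
        rw [hv] at h0
        exact hnil (List.map_eq_nil_iff.mp h0)
    | some m => exact ⟨m, rfl⟩
  have hMmax : ∀ p ∈ cs, p.2 ≤ M := by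
    intro p hp
    exact PySem.List.max?_isMax hM p.2 (show p.2 ∈ cs.map Prod.snd from List.mem_map_of_mem hp)
  have hkeysnd : (PySem.Dict.mk cs).keys.Nodup := hknd
  have hval : ∀ p ∈ cs, (PySem.Dict.mk cs).getD p.1 0 = p.2 := by
    intro p hp
    exact PySem.Dict.getD_of_mem_items _ (by simpa using hp) hkeysnd 0
  set cands := (cs.filter (fun p => p.2 == M)).map Prod.fst with hcands
  have hfoldc : cs.foldl (fun acc p => if p.2 == M then acc ++ [p.1] else acc) [] = cands := by
    simpa using PySem.List.foldl_append_if (fun p => p.2 == M) Prod.fst cs []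
  have hmemc : ∀ y, y ∈ cands ↔ ∃ p, p ∈ cs ∧ p.1 = y ∧ p.2 = M := by
    intro y
    simp only [hcands, List.mem_map, List.mem_filter, beq_iff_eq]
    constructor
    · rintro ⟨p, ⟨hp, hpM⟩, hpy⟩; exact ⟨p, hp, hpy, hpM⟩
    · rintro ⟨p, hp, hpy, hpM⟩; exact ⟨p, ⟨hp, hpM⟩, hpy⟩
  have hk1 : ∀ y ∈ cs.map Prod.fst,
      (PySem.Dict.mk cs).getD y 0 ≤ M ∧ ((PySem.Dict.mk cs).getD y 0 = M → y ∈ cands) := by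
    intro y hy
    obtain ⟨p, hp, rfl⟩ := List.mem_map.mp hy
    rw [hval p hp]
    exact ⟨hMmax p hp, fun h => (hmemc p.1).mpr ⟨p, hp, rfl, h⟩⟩
  have hk1c : ∀ y ∈ cands, y ∈ cs.map Prod.fst → (PySem.Dict.mk cs).getD y 0 = M := by
    intro y hy _
    obtain ⟨p, hp, hpy, hpM⟩ := (hmemc y).mp hy
    rw [← hpy, hval p hp, hpM]
  have hsubk : ∀ y ∈ cands, y ∈ cs.map Prod.fst := by
    intro y hy
    obtain ⟨p, hp, hpy, _⟩ := (hmemc y).mp hy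
    exact hpy ▸ List.mem_map_of_mem hp
  have hcne : cands ≠ [] := by
    have hMmem := PySem.List.max?_mem hM
    have hv : (PySem.Dict.mk cs).values = cs.map Prod.snd := rfl
    rw [hv] at hMmem
    obtain ⟨p, hp, hpM⟩ := List.mem_map.mp hMmem
    intro h
    have := (hmemc p.1).mpr ⟨p, hp, rfl, hpM⟩
    rw [h] at this
    simp at this
  set focus := stageFocusOrder.getD stage [] with hfocusdef
  have hfnd : focus.Nodup := focus_nodup stage
  set k1 : String → Int := fun c => (PySem.Dict.mk cs).getD c 0 with hk1def
  set k2 : String → Int := fun c => -((rankDict focus).getD c (focus.length : Int)) with hk2def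
  have hA : select_main_theme_py stage cs =
      (if cands.length = 1 then cands.headD ""
       else match focus.find? (fun cat => cands.contains cat) with
            | some cat => cat
            | none => cands.headD "") := by
    unfold select_main_theme_py
    rw [if_neg hnil, hM]
    simp only [hfoldc]
    rw [hfocusdef]
  have hB : select_main_theme_py_alt stage cs =
      (match (cs.map Prod.fst).foldl (maxStep k1 k2) none with
       | some c => c
       | none => "general") := by
    simp only [select_main_theme_py_alt, max2_eq_foldl]
    rw [if_neg hnil]
  rw [hA, hB]
  by_cases hlen : cands.length = 1
  · obtain ⟨c, hc⟩ := List.length_eq_one_iff.mp hlen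
    have hcm : c ∈ cands := by simp [hc]
    have hfold := foldl_eq_unique k1 k2 (cs.map Prod.fst) hknd cands M hk1 hk1c c hcm (hsubk c hcm)
      (by intro y hy _
          rw [hc] at hy
          simp at hy
          subst hy
          exact ⟨le_refl _, fun _ => rfl⟩)
    rw [if_pos hlen, hfold, hc]
    rfl
  · rw [if_neg hlen]
    cases hfind : focus.find? (fun cat => cands.contains cat) with
    | some m =>
        obtain ⟨hm, hrank⟩ := find?_rank focus hfnd cands m hfind
        have hfold := foldl_eq_unique k1 k2 (cs.map Prod.fst) hknd cands M hk1 hk1c m hm (hsubk m hm)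
          (by intro y hy _
              obtain ⟨hle, heqq⟩ := hrank y hy
              constructor
              · simp only [hk2def]; omega
              · intro h
                apply heqq
                simp only [hk2def] at h
                omega)
        rw [hfold]
    | none =>
        have hallr : ∀ y ∈ cands, (rankDict focus).getD y (focus.length : Int) = (focus.length : Int) := by
          intro y hy
          apply rankDict_getD_not_mem _ hfnd
          intro hyf
          have h0 := List.find?_eq_none.mp hfind y hyf
          simp at h0
          exact h0 hy
        obtain ⟨p0, hp0⟩ : ∃ p0, cs.find? (fun p => p.2 == M) = some p0 := by
          cases h : cs.find? (fun p => p.2 == M) with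
          | none =>
              exfalso
              have hMmem := PySem.List.max?_mem hM
              have hv : (PySem.Dict.mk cs).values = cs.map Prod.snd := rfl
              rw [hv] at hMmem
              obtain ⟨p, hp, hpM⟩ := List.mem_map.mp hMmem
              have := List.find?_eq_none.mp h p hp
              simp [hpM] at this
          | some p0 => exact ⟨p0, rfl⟩
        obtain ⟨hp0q, l0, r0, hsp0, hl0⟩ := List.find?_eq_some_iff_append.mp hp0
        have hp0M : p0.2 = M := by simpa using hp0q
        have hp0C : p0 ∈ cs := by rw [hsp0]; simp
        have hp0cand : p0.1 ∈ cands := (hmemc p0.1).mpr ⟨p0, hp0C, rfl, hp0M⟩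
        have hhead : cands.headD "" = p0.1 := by
          rw [hcands, hsp0, List.filter_append]
          have hfe : l0.filter (fun p => p.2 == M) = [] :=
            List.filter_eq_nil_iff.mpr (fun a ha => by simpa using hl0 a ha)
          simp [hfe, hp0q]
        have hdecomp : cs.map Prod.fst = l0.map Prod.fst ++ p0.1 :: r0.map Prod.fst := by
          rw [hsp0]; simp
        have hfold : (cs.map Prod.fst).foldl (maxStep k1 k2) none = some p0.1 := by
          rw [hdecomp]
          apply foldl_main
          · intro y hy
            obtain ⟨e, he, hey⟩ := List.mem_map.mp hy
            have heC : e ∈ cs := by rw [hsp0]; simp [he]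
            have hene : e.2 ≠ M := by simpa using hl0 e he
            rw [ltKey_iff]
            left
            subst hey
            rw [hk1def]
            simp only
            rw [hval e heC, hval p0 hp0C, hp0M]
            exact lt_of_le_of_ne (hMmax e heC) hene
          · intro y hy
            have hyk : y ∈ cs.map Prod.fst := by rw [hdecomp]; simp [hy]
            rw [← Bool.not_eq_true, ltKey_iff]
            push Not
            have hyle := (hk1 y hyk).1
            have hk1p0 : k1 p0.1 = M := by
              rw [hk1def]; simp only; rw [hval p0 hp0C, hp0M]
            constructor
            · rw [hk1p0]; omega
            · intro hge
              have hyM : k1 y = M := le_antisymm hyle (by rw [hk1p0] at hge; exact hge)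
              have hyc : y ∈ cands := (hk1 y hyk).2 hyM
              rw [hk2def]
              simp only
              rw [hallr y hyc, hallr p0.1 hp0cand]
        rw [hfold, hhead]
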